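-- pv_equiv track=rewrite | github.com/selfreferencing/erdos-86-lean | Zeroless/exp60_carry_cascade.py | get_digits_and_carries
-- ===== SOURCE A (Python) =====
-- def get_digits_and_carries(n):
--     """
--     Get digits of 2^n and the carry sequence when computing 2^{n+1}.
--     Returns (digits, carries) where:
--     - digits[i] = i-th digit of 2^n (LSB first)
--     - carries[i] = carry entering position i when computing 2^{n+1}
--     """
--     power = 2 ** n
--     digits = []
--     while power > 0:
--         digits.append(power % 10)
--         power //= 10
--
--     # Compute carry sequence
--     carries = [0]  # Initial carry is 0
--     carry = 0
--     for d in digits: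
--         val = 2 * d + carry
--         carry = val // 10
--         carries.append(carry)
--
--     return digits, carries[:-1]  # Remove last carry (overflow)
-- ===== SOURCE B (Python) =====
-- def get_digits_and_carries(n):
--     """
--     Get digits of 2^n and the carry sequence when computing 2^{n+1}.
--     Returns (digits, carries) where:
--     - digits[i] = i-th digit of 2^n (LSB first)
--     - carries[i] = carry entering position i when computing 2^{n+1}
--     """
--     power = 2 ** n
--     digits = []
--     while power > 0:
--         digits.append(power % 10)
--         power //= 10
--
--     # The carry into position i+1 when doubling depends only on digits[i]:
--     # 2*d is even, so adding an incoming carry of 0 or 1 never changes (2*d+c)//10.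
--     carries = [0] + [(2 * d) // 10 for d in digits[:-1]]
--     return digits, carries
-- ===== Notes on version B (the rewrite author's own statement) =====
-- stated objective: simpler
-- what changed: The stateful carry loop threading a carry accumulator is replaced by a stateless per-digit computation carries = [0] + [(2*d)//10 for d in digits[:-1]], using the fact that the incoming carry (0 or 1) never affects (2*d+c)//10 because 2*d is even.
-- outside the precondition, e.g. on get_digits_and_carries(-1): A returns ([0.5], [0]), B returns ([0.5], [0]); on get_digits_and_carries(-4562): A returns ([], []), B returns ([], [0])
import Mathlib
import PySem

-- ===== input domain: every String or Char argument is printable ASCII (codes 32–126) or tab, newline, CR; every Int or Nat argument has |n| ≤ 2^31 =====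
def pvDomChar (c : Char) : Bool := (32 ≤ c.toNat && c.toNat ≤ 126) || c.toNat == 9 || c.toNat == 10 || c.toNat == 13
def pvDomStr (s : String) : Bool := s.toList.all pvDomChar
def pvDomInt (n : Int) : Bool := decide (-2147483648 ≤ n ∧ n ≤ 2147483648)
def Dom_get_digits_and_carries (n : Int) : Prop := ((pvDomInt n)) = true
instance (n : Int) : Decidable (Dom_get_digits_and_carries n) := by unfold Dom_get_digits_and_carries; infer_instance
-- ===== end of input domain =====

-- B replaces A's stateful carry loop by a stateless per-digit formula [0] + [(2*d)//10 …]; objective: simpler.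

-- ===== PORT A =====
-- the `while power > 0: digits.append(power % 10); power //= 10` loop (power : Nat here, exact for n ≥ 0)
def pyDigits (p : Nat) : List Int :=
  if h : p = 0 then []
  else ((p % 10 : Nat) : Int) :: pyDigits (p / 10)
decreasing_by exact Nat.div_lt_self (Nat.pos_of_ne_zero h) (by omega)

-- For n < 0 Python's 2**n is a float (excluded by Pre_); the port uses 0 there so the loop body never runs.
def get_digits_and_carries (n : Int) : List Int × List Int :=
  let digits := pyDigits (if 0 ≤ n then 2 ^ n.toNat else 0)
  -- for d in digits: val = 2*d + carry; carry = val // 10; carries.append(carry)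
  let st := digits.foldl
    (fun (st : List Int × Int) d =>
      let val := 2 * d + st.2
      let carry := PySem.Int.floordiv val 10
      (st.1 ++ [carry], carry)) ([0], 0)
  (digits, st.1.dropLast)  -- carries[:-1]

-- ===== PORT B =====
def get_digits_and_carries_alt (n : Int) : List Int × List Int :=
  let digits := pyDigits (if 0 ≤ n then 2 ^ n.toNat else 0)
  -- carries = [0] + [(2*d)//10 for d in digits[:-1]]
  (digits, 0 :: digits.dropLast.map (fun d => PySem.Int.floordiv (2 * d) 10))

-- ===== PRECONDITION & SPEC =====
-- Pre_ excludes n < 0, where Python's 2**n is a float: A returns float digits (not values of type int),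
-- or, when 2**n underflows to 0.0, an accidental empty carry list A's [:-1] trim produces.
def Pre_get_digits_and_carries (n : Int) : Prop := 0 ≤ n
instance (n : Int) : Decidable (Pre_get_digits_and_carries n) := by unfold Pre_get_digits_and_carries; infer_instance
def pvWitness_get_digits_and_carries : Int := 5

def Spec_get_digits_and_carries (n : Int) (out : List Int × List Int) : Prop := out = get_digits_and_carries_alt n
instance (n : Int) (out : List Int × List Int) : Decidable (Spec_get_digits_and_carries n out) := by unfold Spec_get_digits_and_carries; infer_instance

-- ===== CLAIM (what is proved, stated in full; the proofs are below) =====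
def Claim_equal_get_digits_and_carries : Prop := ∀ (n : Int), Dom_get_digits_and_carries n → Pre_get_digits_and_carries n → Spec_get_digits_and_carries n (get_digits_and_carries n)

-- ===== LEMMAS AND PROOFS =====

lemma pyDigits_mem (p : Nat) : ∀ d ∈ pyDigits p, 0 ≤ d ∧ d < 10 := by
  induction p using Nat.strong_induction_on with
  | _ p ih =>
    rw [pyDigits]
    split
    · simp
    · rename_i h
      intro d hd
      rcases List.mem_cons.1 hd with rfl | hm
      · have : p % 10 < 10 := Nat.mod_lt _ (by omega)
        constructor <;> [positivity; exact_mod_cast this]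
      · exact ih (p / 10) (Nat.div_lt_self (Nat.pos_of_ne_zero h) (by omega)) d hm

lemma pyDigits_ne_nil (p : Nat) (hp : p ≠ 0) : pyDigits p ≠ [] := by
  rw [pyDigits]; simp [hp]

-- incoming carry 0 or 1 never changes the outgoing carry, because 2*d is even
lemma carry_indep (d c : Int) (hd : 0 ≤ d ∧ d < 10) (hc : c = 0 ∨ c = 1) :
    PySem.Int.floordiv (2 * d + c) 10 = PySem.Int.floordiv (2 * d) 10 ∧
    (PySem.Int.floordiv (2 * d) 10 = 0 ∨ PySem.Int.floordiv (2 * d) 10 = 1) := by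
  obtain ⟨h0, h1⟩ := hd
  rcases hc with rfl | rfl <;> interval_cases d <;> simp_all

lemma carry_loop (ds : List Int) (acc : List Int) (c : Int)
    (hds : ∀ d ∈ ds, 0 ≤ d ∧ d < 10) (hc : c = 0 ∨ c = 1) :
    (ds.foldl
      (fun (st : List Int × Int) d =>
        (st.1 ++ [PySem.Int.floordiv (2 * d + st.2) 10], PySem.Int.floordiv (2 * d + st.2) 10)) (acc, c)).1
    = acc ++ ds.map (fun d => PySem.Int.floordiv (2 * d) 10) := by
  induction ds generalizing acc c with
  | nil => simp
  | cons d ds ih =>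
    have hd := hds d (List.mem_cons_self ..)
    obtain ⟨heq, hout⟩ := carry_indep d c hd hc
    simp only [List.foldl_cons, List.map_cons]
    rw [heq]
    rw [ih (acc ++ [PySem.Int.floordiv (2 * d) 10]) _
          (fun x hx => hds x (List.mem_cons_of_mem _ hx)) hout]
    simp

-- ===== VERDICT (by name: the statement is the Claim_ definition above) =====
theorem get_digits_and_carries_spec : Claim_equal_get_digits_and_carries := by
  intro n _ hn
  have hn' : 0 ≤ n := hn
  unfold Spec_get_digits_and_carries get_digits_and_carries get_digits_and_carries_alt
  rw [if_pos hn']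
  set p := 2 ^ n.toNat with hp
  have hpne : p ≠ 0 := by positivity
  have hmem := pyDigits_mem p
  have hne := pyDigits_ne_nil p hpne
  simp only []
  rw [carry_loop (pyDigits p) [0] 0 hmem (Or.inl rfl)]
  refine Prod.ext rfl ?_
  simp only []
  rw [List.singleton_append, List.dropLast_cons_of_ne_nil (by simpa using hne),
    ← List.map_dropLast]
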